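-- pv_equiv track=rewrite | github.com/jaredfung9/fung-jared-advent-of-code-repository | AOC2024/day_01/day_1.py | calculate_simularity_score
-- ===== SOURCE A (Python) =====
-- def calculate_simularity_score(l1, l2):
--     freq = {}
--     for entry_in_2 in l2:
--         if (entry_in_2 not in freq):
--             freq[entry_in_2] = 1
--         else:
--             freq[entry_in_2] += 1
--
--     sim_score = 0
--     for entry_in_1 in l1:
--         if entry_in_1 not in freq:
--             continue
--         sim_score += freq[entry_in_1]*int(entry_in_1)
--     return sim_score
-- ===== SOURCE B (Python) =====
-- def calculate_simularity_score(l1, l2):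
--     c1 = {}
--     for x in l1:
--         c1[x] = c1.get(x, 0) + 1
--     c2 = {}
--     for x in l2:
--         c2[x] = c2.get(x, 0) + 1
--     score = 0
--     for key, n1 in c1.items():
--         if key in c2:
--             score += key * n1 * c2[key]
--     return score
-- ===== Notes on version B (the rewrite author's own statement) =====
-- stated objective: alternative
-- what changed: B counts both lists into frequency dicts and sums key*count1[key]*count2[key] over the distinct keys of l1 present in l2, instead of A's per-element scan of l1 with a single l2 frequency dict.
import Mathlib
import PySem

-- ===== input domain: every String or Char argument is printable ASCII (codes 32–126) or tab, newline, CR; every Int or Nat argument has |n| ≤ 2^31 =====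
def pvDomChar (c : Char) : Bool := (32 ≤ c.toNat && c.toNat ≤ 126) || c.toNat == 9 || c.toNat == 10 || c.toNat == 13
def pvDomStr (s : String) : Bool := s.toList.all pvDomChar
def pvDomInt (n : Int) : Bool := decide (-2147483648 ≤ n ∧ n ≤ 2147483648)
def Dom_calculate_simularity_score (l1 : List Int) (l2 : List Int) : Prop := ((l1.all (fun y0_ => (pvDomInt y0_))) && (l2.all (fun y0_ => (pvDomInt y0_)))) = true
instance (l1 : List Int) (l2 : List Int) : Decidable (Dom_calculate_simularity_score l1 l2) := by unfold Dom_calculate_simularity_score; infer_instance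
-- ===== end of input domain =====

-- B builds frequency dicts for BOTH lists and sums key*count1*count2 over l1's distinct keys present in l2 (alternative decomposition; same cost).


-- ===== PORT A =====
def calculate_simularity_score (l1 : List Int) (l2 : List Int) : Int :=
  -- freq = {}; for e in l2: if e not in freq: freq[e] = 1 else: freq[e] += 1
  let freq : PySem.Dict Int Int :=
    l2.foldl (fun d e => if ¬ (d.contains e) then d.insert e 1 else d.insert e (d.getD e 0 + 1)) PySem.Dict.empty
  -- sim_score = 0; for e in l1: if e not in freq: continue; sim_score += freq[e]*int(e)
  l1.foldl (fun s e => if ¬ (freq.contains e) then s else s + freq.getD e 0 * e) 0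

-- ===== PORT B =====
def calculate_simularity_score_alt (l1 : List Int) (l2 : List Int) : Int :=
  let c1 : PySem.Dict Int Int := l1.foldl (fun d x => d.insert x (d.getD x 0 + 1)) PySem.Dict.empty
  let c2 : PySem.Dict Int Int := l2.foldl (fun d x => d.insert x (d.getD x 0 + 1)) PySem.Dict.empty
  c1.items.foldl (fun s kv => if c2.contains kv.1 then s + kv.1 * kv.2 * c2.getD kv.1 0 else s) 0

-- ===== PRECONDITION & SPEC =====
def Spec_calculate_simularity_score (l1 : List Int) (l2 : List Int) (out : Int) : Prop := out = calculate_simularity_score_alt l1 l2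
instance (l1 : List Int) (l2 : List Int) (out : Int) : Decidable (Spec_calculate_simularity_score l1 l2 out) := by unfold Spec_calculate_simularity_score; infer_instance

-- ===== CLAIM (what is proved, stated in full; the proofs are below) =====
def Claim_equal_calculate_simularity_score : Prop := ∀ (l1 : List Int) (l2 : List Int), Dom_calculate_simularity_score l1 l2 → Spec_calculate_simularity_score l1 l2 (calculate_simularity_score l1 l2)

-- ===== LEMMAS AND PROOFS =====

-- A's conditional-insert loop builds exactly Counter(l2)
theorem pvA_freq_eq_counter (l2 : List Int) :
    l2.foldl (fun d e => if ¬ (d.contains e) then d.insert e 1 else d.insert e (d.getD e 0 + 1)) PySem.Dict.empty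
      = PySem.Dict.counter l2 := by
  rw [PySem.List.foldl_congr_mem _ _ (fun d x => d.insert x (d.getD x 0 + 1)) _ ?_]
  · exact PySem.Dict.foldl_insert_getD_add_one_eq_counter l2
  · intro d x _
    by_cases h : d.contains x = true
    · simp [h]
    · have h' : d.contains x = false := by simpa using h
      simp [h', PySem.Dict.getD_of_not_contains d 0 h']

-- over a Nodup list containing x, a one-hot sum picks out f x
theorem pvOneHot (f : Int → Int) (x : Int) :
    ∀ (s : List Int), s.Nodup → x ∈ s → (s.map (fun k => if k = x then f k else 0)).sum = f x := by
  intro s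
  induction s with
  | nil => intro _ h; cases h
  | cons a t ih =>
    intro hs hx
    have ha : a ∉ t := (List.nodup_cons.mp hs).1
    have ht : t.Nodup := (List.nodup_cons.mp hs).2
    rcases List.mem_cons.mp hx with rfl | hx
    · simp only [List.map_cons, List.sum_cons]
      have hz : ∀ k ∈ t, (if k = x then f k else 0) = 0 := by
        intro k hk
        have : k ≠ x := fun h => ha (h ▸ hk)
        simp [this]
      rw [List.map_congr_left hz]
      simp
    · have hax : a ≠ x := fun h => ha (h ▸ hx)
      simp only [List.map_cons, List.sum_cons, if_neg hax]
      rw [ih ht hx]; ring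

-- grouping over any Nodup superset of the values of l
theorem pvGroupGen (f : Int → Int) :
    ∀ (l s : List Int), s.Nodup → (∀ x ∈ l, x ∈ s) →
      (l.map f).sum = (s.map (fun k => (l.count k : Int) * f k)).sum := by
  intro l
  induction l with
  | nil =>
    intro s _ _
    have : ∀ k ∈ s, ((List.count k ([] : List Int) : Int) * f k) = 0 := by
      intro k _; simp
    rw [List.map_congr_left this]; simp
  | cons x t ih =>
    intro s hs hsub
    have hx : x ∈ s := hsub x (List.mem_cons_self)
    have hsub' : ∀ y ∈ t, y ∈ s := fun y hy => hsub y (List.mem_cons_of_mem _ hy)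
    have hstep : ∀ k ∈ s, ((List.count k (x :: t) : Int) * f k)
        = (List.count k t : Int) * f k + (if k = x then f k else 0) := by
      intro k _
      rw [List.count_cons]
      by_cases h : k = x
      · simp [h]; ring
      · have hbe : (x == k) = false := beq_eq_false_iff_ne.mpr (fun hh => h hh.symm)
        simp [hbe, h]
    calc ((x :: t).map f).sum
        = f x + (t.map f).sum := by simp
      _ = f x + (s.map (fun k => (List.count k t : Int) * f k)).sum := by rw [ih s hs hsub']
      _ = (s.map (fun k => (List.count k t : Int) * f k)).sum
            + (s.map (fun k => if k = x then f k else 0)).sum := by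
            rw [pvOneHot f x s hs hx]; ring
      _ = (s.map (fun k => (List.count k t : Int) * f k + (if k = x then f k else 0))).sum := by
            rw [PySem.List.sum_map_add_int]
      _ = (s.map (fun k => (List.count k (x :: t) : Int) * f k)).sum := by
            rw [List.map_congr_left hstep]

theorem calculate_simularity_score_spec : Claim_equal_calculate_simularity_score := by
  intro l1 l2 _
  unfold Spec_calculate_simularity_score calculate_simularity_score calculate_simularity_score_alt
  rw [pvA_freq_eq_counter l2, PySem.Dict.foldl_insert_getD_add_one_eq_counter l1,
      PySem.Dict.foldl_insert_getD_add_one_eq_counter l2]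
  dsimp only
  rw [PySem.Dict.items_counter, List.foldl_map]
  dsimp only
  have hA : l1.foldl
      (fun s e => if ¬ ((PySem.Dict.counter l2).contains e) then s else s + (PySem.Dict.counter l2).getD e 0 * e) 0
      = (l1.map (fun e => if l2.contains e then (l2.count e : Int) * e else 0)).sum := by
    rw [PySem.List.foldl_congr_mem _ _
        (fun s e => s + (if l2.contains e then (l2.count e : Int) * e else 0)) 0 ?_]
    · rw [PySem.List.foldl_add]; ring
    · intro s e _
      by_cases h : l2.contains e = true
      · have hm : e ∈ l2 := by simpa using h
        simp [hm, PySem.Dict.contains_counter, PySem.Dict.getD_counter]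
      · have h' : l2.contains e = false := by simpa using h
        have hm : e ∉ l2 := by simpa using h'
        simp [hm, PySem.Dict.contains_counter]
  have hB : (PySem.Set.ofList l1).foldl
      (fun s k => if (PySem.Dict.counter l2).contains k then s + k * (l1.count k : Int) * (PySem.Dict.counter l2).getD k 0 else s) 0
      = ((PySem.Set.ofList l1).map
          (fun k => if l2.contains k then k * (l1.count k : Int) * (l2.count k : Int) else 0)).sum := by
    rw [PySem.List.foldl_congr_mem _ _
        (fun s k => s + (if l2.contains k then k * (l1.count k : Int) * (l2.count k : Int) else 0)) 0 ?_]
    · rw [PySem.List.foldl_add]; ring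
    · intro s k _
      by_cases h : l2.contains k = true
      · have hm : k ∈ l2 := by simpa using h
        simp [hm, PySem.Dict.contains_counter, PySem.Dict.getD_counter]
      · have h' : l2.contains k = false := by simpa using h
        have hm : k ∉ l2 := by simpa using h'
        simp [hm, PySem.Dict.contains_counter]
  rw [hA, hB]
  rw [pvGroupGen (fun e => if l2.contains e then (l2.count e : Int) * e else 0) l1
        (PySem.Set.ofList l1) (PySem.Set.nodup_ofList l1)
        (fun x hx => (PySem.Set.mem_ofList l1 x).mpr hx)]
  congr 1
  apply List.map_congr_left
  intro k _
  by_cases h : l2.contains k = true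
  · have hm : k ∈ l2 := by simpa using h
    simp [hm]; ring
  · have h' : l2.contains k = false := by simpa using h
    have hm : k ∉ l2 := by simpa using h'
    simp [hm]
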